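-- pv_equiv track=rewrite | github.com/Vadi26/Computer-Networks | 1Assignment.py | number_with_set_bits
-- ===== SOURCE A (Python) =====
-- def helper(num_set_bits):
--     result = 255
--     num = 0
--     for _ in range(8 - num_set_bits):
--         num = (num << 1) | 1
--
--     result = result ^ num
--
--     return result
--
-- def number_with_set_bits(num_set_bits):
--     ans = []
--     while(num_set_bits > 7):
--         ans.append(255)
--         num_set_bits -= 8
--
--     if (num_set_bits > 0):
--         ans.append(helper(num_set_bits))
--
--     while (len(ans) != 4):
--         ans.append(0)
--
--     return ans
-- ===== SOURCE B (Python) =====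
-- def number_with_set_bits(num_set_bits):
--     if num_set_bits > 0:
--         q, r = divmod(num_set_bits, 8)
--     else:
--         q, r = 0, 0
--     ans = [255] * q
--     if r > 0:
--         ans.append((0xFF << (8 - r)) & 0xFF)
--     ans += [0] * (4 - len(ans))
--     return ans
-- ===== Notes on version B (the rewrite author's own statement) =====
-- stated objective: simpler
-- what changed: Replaces A's subtract-8 while-loop, bit-building helper loop and append-until-4 padding loop with a single closed form: divmod by 8, a replicated list of 255s, one shift-and-mask for the partial byte, and arithmetic padding.
-- outside the precondition, e.g. on number_with_set_bits(33): A does not finish within the time limit, B returns [255, 255, 255, 255, 128]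
import Mathlib
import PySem

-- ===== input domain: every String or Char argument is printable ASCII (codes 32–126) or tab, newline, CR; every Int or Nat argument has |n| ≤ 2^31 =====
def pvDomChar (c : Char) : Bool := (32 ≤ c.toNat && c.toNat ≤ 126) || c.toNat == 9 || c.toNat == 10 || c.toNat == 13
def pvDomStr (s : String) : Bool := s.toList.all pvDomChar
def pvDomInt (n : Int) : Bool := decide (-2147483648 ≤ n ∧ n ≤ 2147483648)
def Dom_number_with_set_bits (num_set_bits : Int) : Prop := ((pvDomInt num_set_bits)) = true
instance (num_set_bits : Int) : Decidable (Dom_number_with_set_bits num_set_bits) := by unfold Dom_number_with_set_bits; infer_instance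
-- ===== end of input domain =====

-- ===== PORT A =====
-- B replaces A's three loops by divmod + replicate + one shift-and-mask; proved equal for num_set_bits ≤ 32.

-- helper: result = 255; num = 0; for _ in range(8 - n): num = (num << 1) | 1; return 255 ^ num
def helperA (num_set_bits : Int) : Int :=
  let result : Int := 255
  let num : Int :=
    (PySem.List.pyRange 0 (8 - num_set_bits) 1).foldl (fun num _ => PySem.Int.bor (num <<< 1) 1) 0
  PySem.Int.bxor result num

-- while (num_set_bits > 7): ans.append(255); num_set_bits -= 8
-- (structural recursion on the fuel num_set_bits.toNat, which bounds the iteration count; exact)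
def loopAF : Nat → Int → List Int → Int × List Int
  | 0, n, ans => (n, ans)
  | fuel + 1, n, ans => if n > 7 then loopAF fuel (n - 8) (ans ++ [255]) else (n, ans)

def loopA (num_set_bits : Int) (ans : List Int) : Int × List Int :=
  loopAF num_set_bits.toNat num_set_bits ans

-- while (len(ans) != 4): ans.append(0).  In Python this diverges when len(ans) > 4
-- (only reachable for num_set_bits > 32, excluded by Pre_); the fuel 4 - len(ans),
-- which is 0 exactly there, only makes the Lean recursion total.
def padAF : Nat → List Int → List Int
  | 0, ans => ans
  | fuel + 1, ans => if ans.length ≠ 4 then padAF fuel (ans ++ [0]) else ans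

def padA (ans : List Int) : List Int := padAF (4 - ans.length) ans

def number_with_set_bits (num_set_bits : Int) : List Int :=
  let (num_set_bits, ans) := loopA num_set_bits []
  let ans := if num_set_bits > 0 then ans ++ [helperA num_set_bits] else ans
  padA ans

-- ===== PORT B =====
def number_with_set_bits_alt (num_set_bits : Int) : List Int :=
  let qr : Int × Int :=
    if num_set_bits > 0 then (PySem.Int.floordiv num_set_bits 8, PySem.Int.mod num_set_bits 8)
    else (0, 0)
  let q := qr.1; let r := qr.2
  let ans := List.replicate q.toNat (255 : Int)  -- [255] * q ; q ≥ 0 here, toNat exact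
  let ans := if r > 0 then ans ++ [PySem.Int.band (255 <<< (8 - r).toNat) 255] else ans
  -- ans += [0] * (4 - len(ans)) ; negative repeat count gives [] in Python = toNat's clamp
  ans ++ List.replicate ((4 - (ans.length : Int)).toNat) (0 : Int)

-- ===== PRECONDITION & SPEC =====
-- Pre_ excludes num_set_bits > 32, on which A's padding while-loop never terminates.
def Pre_number_with_set_bits (num_set_bits : Int) : Prop := num_set_bits ≤ 32
instance (num_set_bits : Int) : Decidable (Pre_number_with_set_bits num_set_bits) := by
  unfold Pre_number_with_set_bits; infer_instance
def pvWitness_number_with_set_bits : Int := (10)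

def Spec_number_with_set_bits (num_set_bits : Int) (out : List Int) : Prop := out = number_with_set_bits_alt num_set_bits
instance (num_set_bits : Int) (out : List Int) : Decidable (Spec_number_with_set_bits num_set_bits out) := by unfold Spec_number_with_set_bits; infer_instance

-- ===== CLAIM (what is proved, stated in full; the proofs are below) =====
def Claim_equal_number_with_set_bits : Prop := ∀ (num_set_bits : Int), Dom_number_with_set_bits num_set_bits → Pre_number_with_set_bits num_set_bits → Spec_number_with_set_bits num_set_bits (number_with_set_bits num_set_bits)

-- ===== LEMMAS AND PROOFS =====

theorem loopAF_le (f : Nat) (n : Int) (hn : n ≤ 7) (ans : List Int) :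
    loopAF f n ans = (n, ans) := by
  cases f with
  | zero => rfl
  | succ f => unfold loopAF; rw [if_neg (by omega)]

theorem loopA_le (n : Int) (hn : n ≤ 7) (ans : List Int) : loopA n ans = (n, ans) :=
  loopAF_le _ n hn ans

theorem padA_nil : padA [] = [0, 0, 0, 0] := by decide

theorem A_nonpos (n : Int) (hn : n ≤ 0) : number_with_set_bits n = [0, 0, 0, 0] := by
  unfold number_with_set_bits
  rw [loopA_le n (by omega)]
  simp only []
  rw [if_neg (by omega)]
  exact padA_nil

theorem B_nonpos (n : Int) (hn : ¬ n > 0) : number_with_set_bits_alt n = [0, 0, 0, 0] := by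
  unfold number_with_set_bits_alt
  rw [if_neg hn]
  rfl

-- ===== VERDICT (by name: the statement is the Claim_ definition above) =====
theorem number_with_set_bits_spec : Claim_equal_number_with_set_bits := by
  intro n _ hpre
  unfold Spec_number_with_set_bits
  unfold Pre_number_with_set_bits at hpre
  by_cases hp : n > 0
  · interval_cases n <;> decide
  · rw [A_nonpos n (by omega), B_nonpos n hp]
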